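-- pv_equiv track=rewrite | github.com/MavProDev/ClawdNotch | create_shortcut.py | render_clawd_rgba
-- ===== SOURCE A (Python) =====
-- CLAWD = [
--     [0,0,1,1,0,0,0,1,1,0,0],
--     [0,1,1,1,1,1,1,1,1,1,0],
--     [0,1,1,1,1,1,1,1,1,1,0],
--     [0,1,2,2,1,1,1,2,2,1,0],
--     [0,1,2,2,1,1,1,2,2,1,0],
--     [0,1,1,1,1,1,1,1,1,1,0],
--     [0,0,1,1,1,1,1,1,1,0,0],
--     [0,0,1,0,1,0,1,0,1,0,0],
--     [0,0,1,0,1,0,1,0,1,0,0],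
--     [0,0,1,0,1,0,1,0,1,0,0],
-- ]
--
-- CORAL = (217, 119, 87, 255)   # body
--
-- EYE   = (35, 25, 22, 255)     # eyes
--
-- TRANS = (0, 0, 0, 0)          # transparent
--
-- def render_clawd_rgba(size):
--     """Render Clawd grid into an RGBA pixel buffer at the given square size."""
--     rows, cols = len(CLAWD), len(CLAWD[0])
--     # Scale factor — integer scale, centered in canvas
--     scale = size // max(rows, cols)
--     if scale < 1: scale = 1
--     pw = cols * scale
--     ph = rows * scale
--     ox = (size - pw) // 2
--     oy = (size - ph) // 2
--
--     pixels = [[TRANS] * size for _ in range(size)]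
--     for ri, row in enumerate(CLAWD):
--         for ci, cell in enumerate(row):
--             if cell == 0:
--                 continue
--             color = CORAL if cell == 1 else EYE
--             for dy in range(scale):
--                 for dx in range(scale):
--                     px = ox + ci * scale + dx
--                     py = oy + ri * scale + dy
--                     if 0 <= px < size and 0 <= py < size:
--                         pixels[py][px] = color
--     return pixels
-- ===== SOURCE B (Python) =====
-- CLAWD = [
--     [0,0,1,1,0,0,0,1,1,0,0],
--     [0,1,1,1,1,1,1,1,1,1,0],
--     [0,1,1,1,1,1,1,1,1,1,0],
--     [0,1,2,2,1,1,1,2,2,1,0],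
--     [0,1,2,2,1,1,1,2,2,1,0],
--     [0,1,1,1,1,1,1,1,1,1,0],
--     [0,0,1,1,1,1,1,1,1,0,0],
--     [0,0,1,0,1,0,1,0,1,0,0],
--     [0,0,1,0,1,0,1,0,1,0,0],
--     [0,0,1,0,1,0,1,0,1,0,0],
-- ]
--
-- CORAL = (217, 119, 87, 255)   # body
-- EYE   = (35, 25, 22, 255)     # eyes
-- TRANS = (0, 0, 0, 0)          # transparent
--
--
-- def _crop_pad(items, off, n, filler):
--     """Place `items` at offset `off` on a length-`n` line of `filler`s, cropping overflow."""
--     line = []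
--     for i in range(n):
--         j = i - off
--         line.append(items[j] if 0 <= j < len(items) else filler)
--     return line
--
--
-- def render_clawd_rgba(size):
--     """Render Clawd grid into an RGBA pixel buffer at the given square size.
--
--     Staged approach: first expand the grid into the fully scaled sprite by
--     block replication (each cell becomes a scale-wide run, each row scale
--     copies), then place the sprite on the transparent canvas with _crop_pad,
--     horizontally per row and once vertically.
--     """
--     rows, cols = len(CLAWD), len(CLAWD[0])
--     scale = max(1, size // max(rows, cols))
--     ox = (size - cols * scale) // 2
--     oy = (size - rows * scale) // 2
--     palette = {0: TRANS, 1: CORAL, 2: EYE}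
--     img = []
--     for row in CLAWD:
--         prow = []
--         for cell in row:
--             prow += [palette[cell]] * scale
--         img += [_crop_pad(prow, ox, size, TRANS)] * scale
--     return _crop_pad(img, oy, size, [TRANS] * size)
-- ===== Notes on version B (the rewrite author's own statement) =====
-- stated objective: alternative
-- what changed: Replaces A's source-scatter fill (initialise a TRANS canvas, then paint each grid cell's scaled block with four nested bounds-checked in-place writes) by a staged build: expand the grid into the scaled sprite by block replication (each cell a scale-long run, each row scale copies), then place the sprite on the canvas with a crop/pad helper, per row horizontally and once vertically; no in-place writes and no per-pixel bounds test inside the paint loops.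
import Mathlib
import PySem

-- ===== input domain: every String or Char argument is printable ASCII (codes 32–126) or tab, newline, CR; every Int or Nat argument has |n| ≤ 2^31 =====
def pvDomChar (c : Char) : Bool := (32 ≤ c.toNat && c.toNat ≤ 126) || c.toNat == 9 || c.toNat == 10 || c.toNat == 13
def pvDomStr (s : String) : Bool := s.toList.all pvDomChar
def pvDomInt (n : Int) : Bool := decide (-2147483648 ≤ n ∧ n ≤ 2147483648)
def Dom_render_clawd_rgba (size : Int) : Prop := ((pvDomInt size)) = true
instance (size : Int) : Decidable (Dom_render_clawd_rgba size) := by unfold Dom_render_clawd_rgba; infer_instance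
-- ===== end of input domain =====

-- B replaces A's scatter fill (paint each grid cell's scaled block into a mutable canvas) by a
-- staged build: block-replicate the grid into the scaled sprite, then crop/pad it onto the canvas;
-- objective: alternative algorithm of the same cost.

-- ===== PORT A =====
def pvCLAWD : List (List Int) := [
  [0,0,1,1,0,0,0,1,1,0,0],
  [0,1,1,1,1,1,1,1,1,1,0],
  [0,1,1,1,1,1,1,1,1,1,0],
  [0,1,2,2,1,1,1,2,2,1,0],
  [0,1,2,2,1,1,1,2,2,1,0],
  [0,1,1,1,1,1,1,1,1,1,0],
  [0,0,1,1,1,1,1,1,1,0,0],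
  [0,0,1,0,1,0,1,0,1,0,0],
  [0,0,1,0,1,0,1,0,1,0,0],
  [0,0,1,0,1,0,1,0,1,0,0]]

def pvCORAL : List Int := [217, 119, 87, 255]
def pvEYE : List Int := [35, 25, 22, 255]
def pvTRANS : List Int := [0, 0, 0, 0]

-- pixels[py][px] = color : read row py, set entry px, write the row back (exact under the
-- caller's 0 ≤ px < size ∧ 0 ≤ py < size guard)
def pvSetPix (p : List (List (List Int))) (py px : Int) (c : List Int) : List (List (List Int)) :=
  PySem.List.pySetD p py (PySem.List.pySetD (PySem.List.pyGetD p py []) px c)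

-- A's scale/offset prelude (rows, cols, scale, ox, oy)
def pvScaleOf (size : Int) : Int :=
  let rows : Int := (pvCLAWD.length : Int)
  let cols : Int := ((PySem.List.pyGetD pvCLAWD 0 []).length : Int)
  let scale0 : Int := PySem.Int.floordiv size (max rows cols)
  if scale0 < 1 then 1 else scale0

def pvOxOf (size : Int) : Int :=
  let cols : Int := ((PySem.List.pyGetD pvCLAWD 0 []).length : Int)
  PySem.Int.floordiv (size - cols * pvScaleOf size) 2

def pvOyOf (size : Int) : Int :=
  let rows : Int := (pvCLAWD.length : Int)
  PySem.Int.floordiv (size - rows * pvScaleOf size) 2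

def render_clawd_rgba (size : Int) : List (List (List Int)) :=
  let scale : Int := pvScaleOf size
  let ox : Int := pvOxOf size
  let oy : Int := pvOyOf size
  let init : List (List (List Int)) := List.replicate size.toNat (List.replicate size.toNat pvTRANS)
  (PySem.List.enumerate pvCLAWD 0).foldl (fun pixels rc =>
    (PySem.List.enumerate rc.2 0).foldl (fun pixels cc =>
      if cc.2 == 0 then pixels
      else
        let color := if cc.2 == 1 then pvCORAL else pvEYE
        (PySem.List.pyRange 0 scale 1).foldl (fun pixels dy =>
          (PySem.List.pyRange 0 scale 1).foldl (fun pixels dx =>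
            let px := ox + cc.1 * scale + dx
            let py := oy + rc.1 * scale + dy
            if 0 ≤ px ∧ px < size ∧ 0 ≤ py ∧ py < size then
              pvSetPix pixels py px color
            else pixels) pixels) pixels) pixels) init

-- ===== PORT B =====
-- palette = {0: TRANS, 1: CORAL, 2: EYE}
def pvPalette : PySem.Dict Int (List Int) :=
  PySem.Dict.ofList [(0, pvTRANS), (1, pvCORAL), (2, pvEYE)]

-- _crop_pad(items, off, n, filler): place items at offset off on a length-n line of fillers
def pvCropPad {α : Type} (items : List α) (off n : Int) (filler : α) : List α :=
  (PySem.List.pyRange 0 n 1).foldl (fun line i =>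
    let j := i - off
    line ++ [if 0 ≤ j ∧ j < (items.length : Int)
             then PySem.List.pyGetD items j filler else filler]) []

def render_clawd_rgba_alt (size : Int) : List (List (List Int)) :=
  let rows : Int := (pvCLAWD.length : Int)
  let cols : Int := ((PySem.List.pyGetD pvCLAWD 0 []).length : Int)
  let scale : Int := max 1 (PySem.Int.floordiv size (max rows cols))
  let ox : Int := PySem.Int.floordiv (size - cols * scale) 2
  let oy : Int := PySem.Int.floordiv (size - rows * scale) 2
  let img : List (List (List Int)) := pvCLAWD.foldl (fun img row =>
    let prow : List (List Int) := row.foldl (fun prow cell =>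
      prow ++ List.replicate scale.toNat (PySem.Dict.getD pvPalette cell [])) []
    img ++ List.replicate scale.toNat (pvCropPad prow ox size pvTRANS)) []
  pvCropPad img oy size (List.replicate size.toNat pvTRANS)

-- ===== PRECONDITION & SPEC =====
def Spec_render_clawd_rgba (size : Int) (out : List (List (List Int))) : Prop := out = render_clawd_rgba_alt size
instance (size : Int) (out : List (List (List Int))) : Decidable (Spec_render_clawd_rgba size out) := by unfold Spec_render_clawd_rgba; infer_instance

-- ===== CLAIM (what is proved, stated in full; the proofs are below) =====
def Claim_equal_render_clawd_rgba : Prop := ∀ (size : Int), Dom_render_clawd_rgba size → Spec_render_clawd_rgba size (render_clawd_rgba size)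

-- ===== LEMMAS AND PROOFS =====

-- the common destination-gather description both sides are reduced to
def pvGather (size scale ox oy : Int) : List (List (List Int)) :=
  (PySem.List.pyRange 0 size 1).map (fun py =>
    (PySem.List.pyRange 0 size 1).map (fun px =>
      if 0 ≤ py - oy ∧ 0 ≤ px - ox ∧
         PySem.Int.floordiv (py - oy) scale < (pvCLAWD.length : Int) ∧
         PySem.Int.floordiv (px - ox) scale < ((PySem.List.pyGetD pvCLAWD 0 []).length : Int) then
        (if PySem.List.pyGetD (PySem.List.pyGetD pvCLAWD (PySem.Int.floordiv (py - oy) scale) [])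
              (PySem.Int.floordiv (px - ox) scale) 0 == 1 then pvCORAL
         else if PySem.List.pyGetD (PySem.List.pyGetD pvCLAWD (PySem.Int.floordiv (py - oy) scale) [])
              (PySem.Int.floordiv (px - ox) scale) 0 == 2 then pvEYE
         else pvTRANS)
      else pvTRANS))

-- proof-only reformulations of A's four nested loops (definitionally equal to the port's body)
def pvFillLine (sz : Int) (c : List Int) (py ox ci scale : Int) (L : List Int)
    (p : List (List (List Int))) : List (List (List Int)) :=
  L.foldl (fun q dx =>
    if 0 ≤ ox + ci * scale + dx ∧ ox + ci * scale + dx < sz ∧ 0 ≤ py ∧ py < sz then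
      pvSetPix q py (ox + ci * scale + dx) c
    else q) p

def pvFillCell (sz scale ox oy : Int) (c : List Int) (ri ci : Int)
    (p : List (List (List Int))) : List (List (List Int)) :=
  (PySem.List.pyRange 0 scale 1).foldl (fun q dy =>
    pvFillLine sz c (oy + ri * scale + dy) ox ci scale (PySem.List.pyRange 0 scale 1) q) p

def pvFillRow (sz scale ox oy ri : Int) (row : List Int) (c0 : Int)
    (p : List (List (List Int))) : List (List (List Int)) :=
  (PySem.List.enumerate row c0).foldl (fun q cc =>
    if cc.2 == 0 then q
    else pvFillCell sz scale ox oy (if cc.2 == 1 then pvCORAL else pvEYE) ri cc.1 q) p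

def pvFillGrid (sz scale ox oy : Int) (grid : List (List Int)) (r0 : Int)
    (p : List (List (List Int))) : List (List (List Int)) :=
  (PySem.List.enumerate grid r0).foldl (fun q rc =>
    pvFillRow sz scale ox oy rc.1 rc.2 0 q) p

def pvShape (n : Nat) (p : List (List (List Int))) : Prop :=
  p.length = n ∧ ∀ r ∈ p, r.length = n

def pvGet2 (p : List (List (List Int))) (y x : Nat) : List Int :=
  (p.getD y []).getD x pvTRANS

theorem pvPyGetD_toNat {α : Type} (xs : List α) (i : Int) (d : α) (h : 0 ≤ i) :
    PySem.List.pyGetD xs i d = xs.getD i.toNat d := by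
  rw [show i = ((i.toNat : Nat) : Int) by omega, PySem.List.pyGetD_natCast]
  simp only [Int.toNat_natCast]

theorem pvSetPix_eq (p : List (List (List Int))) (py px : Int) (c : List Int)
    (hpy : 0 ≤ py) (hpx : 0 ≤ px) :
    pvSetPix p py px c = p.set py.toNat ((p.getD py.toNat []).set px.toNat c) := by
  unfold pvSetPix
  rw [PySem.List.pySetD_of_nonneg _ _ hpy, PySem.List.pySetD_of_nonneg _ _ hpx]
  rw [pvPyGetD_toNat _ _ _ hpy]

theorem pvShape_setPix (n : Nat) (p : List (List (List Int))) (hp : pvShape n p)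
    (py px : Int) (hpy : 0 ≤ py) (hpx : 0 ≤ px) (c : List Int) :
    pvShape n (pvSetPix p py px c) := by
  rw [pvSetPix_eq p py px c hpy hpx]
  obtain ⟨hlen, hrows⟩ := hp
  refine ⟨by simpa using hlen, ?_⟩
  intro r hr
  by_cases hlt : py.toNat < p.length
  · rcases List.mem_or_eq_of_mem_set hr with h | h
    · exact hrows r h
    · subst h
      rw [List.length_set, List.getD_eq_getElem _ _ hlt]
      exact hrows _ (List.getElem_mem hlt)
  · rw [List.set_eq_of_length_le (by omega)] at hr
    exact hrows r hr

theorem pvGet2_setPix (n : Nat) (p : List (List (List Int))) (hp : pvShape n p)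
    (py px : Int) (h0y : 0 ≤ py) (hyn : py < (n : Int)) (h0x : 0 ≤ px) (hxn : px < (n : Int))
    (c : List Int) (y x : Nat) (hy : y < n) (hx : x < n) :
    pvGet2 (pvSetPix p py px c) y x =
      if py = (y : Int) ∧ px = (x : Int) then c else pvGet2 p y x := by
  obtain ⟨hlen, hrows⟩ := hp
  rw [pvSetPix_eq p py px c h0y h0x]
  unfold pvGet2
  have hyl : py.toNat < p.length := by omega
  have hrowl : (p.getD py.toNat []).length = n := by
    rw [List.getD_eq_getElem _ _ hyl]; exact hrows _ (List.getElem_mem hyl)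
  by_cases hyy : py.toNat = y
  · subst hyy
    have h1 : (p.set py.toNat ((p.getD py.toNat []).set px.toNat c)).getD py.toNat [] =
        (p.getD py.toNat []).set px.toNat c := by
      rw [List.getD_eq_getElem?_getD, List.getElem?_set_self hyl, Option.getD_some]
    rw [h1]
    by_cases hxx : px.toNat = x
    · subst hxx
      rw [List.getD_eq_getElem?_getD, List.getElem?_set_self (by omega), Option.getD_some,
        if_pos (⟨by omega, by omega⟩ : py = (py.toNat : Int) ∧ px = (px.toNat : Int))]
    · rw [List.getD_eq_getElem?_getD, List.getElem?_set_ne hxx, ← List.getD_eq_getElem?_getD,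
        if_neg (by omega : ¬(py = (py.toNat : Int) ∧ px = (x : Int)))]
  · have h1 : (p.set py.toNat ((p.getD py.toNat []).set px.toNat c)).getD y [] =
        p.getD y [] := by
      rw [List.getD_eq_getElem?_getD, List.getElem?_set_ne hyy, ← List.getD_eq_getElem?_getD]
    rw [h1, if_neg (by omega : ¬(py = (y : Int) ∧ px = (x : Int)))]

theorem pvFillLine_spec (n : Nat) (sz : Int) (hsz : (n : Int) = sz) (c : List Int)
    (py ox ci scale : Int) (L : List Int) (p : List (List (List Int))) (hp : pvShape n p)
    (y x : Nat) (hy : y < n) (hx : x < n) :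
    pvShape n (pvFillLine sz c py ox ci scale L p) ∧
    pvGet2 (pvFillLine sz c py ox ci scale L p) y x =
      if py = (y : Int) ∧ ∃ dx ∈ L, ox + ci * scale + dx = (x : Int) then c
      else pvGet2 p y x := by
  induction L generalizing p with
  | nil => simpa [pvFillLine] using hp
  | cons a L ih =>
    rw [show pvFillLine sz c py ox ci scale (a :: L) p =
        pvFillLine sz c py ox ci scale L
          (if 0 ≤ ox + ci * scale + a ∧ ox + ci * scale + a < sz ∧ 0 ≤ py ∧ py < sz then
            pvSetPix p py (ox + ci * scale + a) c
          else p) from rfl]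
    by_cases hg : 0 ≤ ox + ci * scale + a ∧ ox + ci * scale + a < sz ∧ 0 ≤ py ∧ py < sz
    · rw [if_pos hg]
      obtain ⟨hg1, hg2, hg3, hg4⟩ := hg
      have hsp := pvShape_setPix n p hp py _ hg3 hg1 c
      obtain ⟨ihs, ihg⟩ := ih _ hsp
      refine ⟨ihs, ?_⟩
      rw [ihg, pvGet2_setPix n p hp py _ hg3 (by omega) hg1 (by omega) c y x hy hx]
      simp only [List.exists_mem_cons_iff]
      by_cases h1 : py = (y : Int)
      · simp only [h1, true_and]
        by_cases h2 : ∃ dx ∈ L, ox + ci * scale + dx = (x : Int)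
        · simp [h2]
        · simp [h2]
      · simp [h1]
    · rw [if_neg hg]
      obtain ⟨ihs, ihg⟩ := ih p hp
      refine ⟨ihs, ihg.trans ?_⟩
      have hna : ¬(py = (y : Int) ∧ ox + ci * scale + a = (x : Int)) := by
        rintro ⟨h1, h2⟩
        exact hg ⟨h2 ▸ Int.natCast_nonneg x, h2 ▸ (hsz ▸ by exact_mod_cast hx),
          h1 ▸ Int.natCast_nonneg y, h1 ▸ (hsz ▸ by exact_mod_cast hy)⟩
      simp only [List.exists_mem_cons_iff]
      by_cases h1 : py = (y : Int)
      · have h2 : ox + ci * scale + a ≠ (x : Int) := fun h => hna ⟨h1, h⟩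
        simp [h1, h2]
      · simp [h1]

theorem pvFillCell_spec (n : Nat) (sz : Int) (hsz : (n : Int) = sz) (scale : Int)
    (hscale : 0 < scale) (ox oy ri ci : Int) (hri : 0 ≤ ri) (hci : 0 ≤ ci) (c : List Int)
    (p : List (List (List Int))) (hp : pvShape n p) (y x : Nat) (hy : y < n) (hx : x < n) :
    pvShape n (pvFillCell sz scale ox oy c ri ci p) ∧
    pvGet2 (pvFillCell sz scale ox oy c ri ci p) y x =
      if PySem.Int.floordiv ((y : Int) - oy) scale = ri ∧
         PySem.Int.floordiv ((x : Int) - ox) scale = ci ∧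
         0 ≤ (y : Int) - oy ∧ 0 ≤ (x : Int) - ox then c
      else pvGet2 p y x := by
  have aux : ∀ (Ldy : List Int) (p : List (List (List Int))), pvShape n p →
      pvShape n (Ldy.foldl (fun q dy =>
        pvFillLine sz c (oy + ri * scale + dy) ox ci scale (PySem.List.pyRange 0 scale 1) q) p) ∧
      pvGet2 (Ldy.foldl (fun q dy =>
        pvFillLine sz c (oy + ri * scale + dy) ox ci scale (PySem.List.pyRange 0 scale 1) q) p) y x =
        if (∃ dy ∈ Ldy, oy + ri * scale + dy = (y : Int)) ∧
           (∃ dx ∈ PySem.List.pyRange 0 scale 1, ox + ci * scale + dx = (x : Int)) then c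
        else pvGet2 p y x := by
    intro Ldy
    induction Ldy with
    | nil => intro p hp; simpa using hp
    | cons a L ih =>
      intro p hp
      rw [List.foldl_cons]
      obtain ⟨hls, hlg⟩ := pvFillLine_spec n sz hsz c (oy + ri * scale + a) ox ci scale
        (PySem.List.pyRange 0 scale 1) p hp y x hy hx
      obtain ⟨ihs, ihg⟩ := ih _ hls
      refine ⟨ihs, ?_⟩
      rw [ihg, hlg]
      simp only [List.exists_mem_cons_iff]
      by_cases hX : ∃ dx ∈ PySem.List.pyRange 0 scale 1, ox + ci * scale + dx = (x : Int)
      · by_cases hL : ∃ dy ∈ L, oy + ri * scale + dy = (y : Int)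
        · rw [if_pos ⟨hL, hX⟩, if_pos ⟨Or.inr hL, hX⟩]
        · rw [if_neg fun h => hL h.1]
          by_cases hhead : oy + ri * scale + a = (y : Int)
          · rw [if_pos ⟨hhead, hX⟩, if_pos ⟨Or.inl hhead, hX⟩]
          · rw [if_neg fun h => hhead h.1, if_neg fun h => h.1.elim hhead hL]
      · rw [if_neg fun h => hX h.2, if_neg fun h => hX h.2, if_neg fun h => hX h.2]
  obtain ⟨hs, hg⟩ := aux (PySem.List.pyRange 0 scale 1) p hp
  have hmul : (ri + 1) * scale = ri * scale + scale := by ring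
  have hmul' : (ci + 1) * scale = ci * scale + scale := by ring
  have hYiff : (∃ dy ∈ PySem.List.pyRange 0 scale 1, oy + ri * scale + dy = (y : Int)) ↔
      (PySem.Int.floordiv ((y : Int) - oy) scale = ri ∧ 0 ≤ (y : Int) - oy) := by
    constructor
    · rintro ⟨dy, hmem, heq⟩
      rw [PySem.List.mem_pyRange_one] at hmem
      have h0 : 0 ≤ ri * scale := mul_nonneg hri (le_of_lt hscale)
      refine ⟨?_, by linarith⟩
      rw [PySem.Int.floordiv_eq_iff_of_pos hscale, hmul]
      constructor <;> linarith
    · rintro ⟨hdiv, hnn⟩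
      rw [PySem.Int.floordiv_eq_iff_of_pos hscale, hmul] at hdiv
      refine ⟨(y : Int) - oy - ri * scale, ?_, by ring⟩
      rw [PySem.List.mem_pyRange_one]
      constructor <;> linarith [hdiv.1, hdiv.2]
  have hXiff : (∃ dx ∈ PySem.List.pyRange 0 scale 1, ox + ci * scale + dx = (x : Int)) ↔
      (PySem.Int.floordiv ((x : Int) - ox) scale = ci ∧ 0 ≤ (x : Int) - ox) := by
    constructor
    · rintro ⟨dx, hmem, heq⟩
      rw [PySem.List.mem_pyRange_one] at hmem
      have h0 : 0 ≤ ci * scale := mul_nonneg hci (le_of_lt hscale)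
      refine ⟨?_, by linarith⟩
      rw [PySem.Int.floordiv_eq_iff_of_pos hscale, hmul']
      constructor <;> linarith
    · rintro ⟨hdiv, hnn⟩
      rw [PySem.Int.floordiv_eq_iff_of_pos hscale, hmul'] at hdiv
      refine ⟨(x : Int) - ox - ci * scale, ?_, by ring⟩
      rw [PySem.List.mem_pyRange_one]
      constructor <;> linarith [hdiv.1, hdiv.2]
  refine ⟨hs, ?_⟩
  rw [show pvFillCell sz scale ox oy c ri ci p =
      (PySem.List.pyRange 0 scale 1).foldl (fun q dy =>
        pvFillLine sz c (oy + ri * scale + dy) ox ci scale (PySem.List.pyRange 0 scale 1) q) p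
    from rfl, hg]
  simp only [hYiff, hXiff]
  exact if_congr (by tauto) rfl rfl

theorem pvFillRow_spec (n : Nat) (sz : Int) (hsz : (n : Int) = sz) (scale : Int)
    (hscale : 0 < scale) (ox oy ri : Int) (hri : 0 ≤ ri) (row : List Int) (c0 : Int)
    (hc0 : 0 ≤ c0) (p : List (List (List Int))) (hp : pvShape n p)
    (y x : Nat) (hy : y < n) (hx : x < n) :
    pvShape n (pvFillRow sz scale ox oy ri row c0 p) ∧
    pvGet2 (pvFillRow sz scale ox oy ri row c0 p) y x =
      if PySem.Int.floordiv ((y : Int) - oy) scale = ri ∧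
         0 ≤ (y : Int) - oy ∧ 0 ≤ (x : Int) - ox ∧
         c0 ≤ PySem.Int.floordiv ((x : Int) - ox) scale ∧
         PySem.Int.floordiv ((x : Int) - ox) scale < c0 + (row.length : Int) ∧
         row.getD (PySem.Int.floordiv ((x : Int) - ox) scale - c0).toNat 0 ≠ 0 then
        (if row.getD (PySem.Int.floordiv ((x : Int) - ox) scale - c0).toNat 0 == 1 then pvCORAL
         else pvEYE)
      else pvGet2 p y x := by
  induction row generalizing c0 p with
  | nil =>
    refine ⟨hp, ?_⟩
    rw [if_neg (by
      rintro ⟨-, -, -, h4, h5, -⟩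
      simp only [List.length_nil, Nat.cast_zero, add_zero] at h5
      linarith)]
    rfl
  | cons v rest ih =>
    rw [show pvFillRow sz scale ox oy ri (v :: rest) c0 p =
        pvFillRow sz scale ox oy ri rest (c0 + 1)
          (if v == 0 then p
           else pvFillCell sz scale ox oy (if v == 1 then pvCORAL else pvEYE) ri c0 p) from by
      simp only [pvFillRow, PySem.List.enumerate_cons, List.foldl_cons]]
    by_cases hv : v = 0
    · simp only [hv, beq_self_eq_true, if_true]
      obtain ⟨ihs, ihg⟩ := ih (c0 + 1) (by omega) p hp
      refine ⟨ihs, ihg.trans ?_⟩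
      simp only [List.length_cons, Nat.cast_add, Nat.cast_one]
      generalize hTx : PySem.Int.floordiv ((x : Int) - ox) scale = Tx
      generalize hTy : PySem.Int.floordiv ((y : Int) - oy) scale = Ty
      by_cases hC : Ty = ri ∧ 0 ≤ (y : Int) - oy ∧ 0 ≤ (x : Int) - ox ∧ c0 ≤ Tx ∧
          Tx < c0 + ((rest.length : Int) + 1) ∧ (0 :: rest).getD (Tx - c0).toNat 0 ≠ 0
      · obtain ⟨h1, h2, h3, h4, h5, h6⟩ := hC
        have hgt : c0 + 1 ≤ Tx := by
          rcases eq_or_lt_of_le h4 with he | hl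
          · exact absurd (by rw [← he, sub_self, Int.toNat_zero, List.getD_cons_zero]) h6
          · omega
        have hidx : (Tx - c0).toNat = (Tx - (c0 + 1)).toNat + 1 := by omega
        rw [hidx, List.getD_cons_succ] at h6
        rw [if_pos (⟨h1, h2, h3, hgt, by omega, h6⟩ :
            Ty = ri ∧ 0 ≤ (y : Int) - oy ∧ 0 ≤ (x : Int) - ox ∧ c0 + 1 ≤ Tx ∧
            Tx < c0 + 1 + (rest.length : Int) ∧ rest.getD (Tx - (c0 + 1)).toNat 0 ≠ 0),
          if_pos (⟨h1, h2, h3, h4, h5, by rw [hidx, List.getD_cons_succ]; exact h6⟩ :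
            Ty = ri ∧ 0 ≤ (y : Int) - oy ∧ 0 ≤ (x : Int) - ox ∧ c0 ≤ Tx ∧
            Tx < c0 + ((rest.length : Int) + 1) ∧ (0 :: rest).getD (Tx - c0).toNat 0 ≠ 0),
          hidx, List.getD_cons_succ]
      · rw [if_neg hC, if_neg (show ¬(Ty = ri ∧ 0 ≤ (y : Int) - oy ∧ 0 ≤ (x : Int) - ox ∧
            c0 + 1 ≤ Tx ∧ Tx < c0 + 1 + (rest.length : Int) ∧
            rest.getD (Tx - (c0 + 1)).toNat 0 ≠ 0) from fun hh => hC (by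
          obtain ⟨h1, h2, h3, h4, h5, h6⟩ := hh
          have hidx : (Tx - c0).toNat = (Tx - (c0 + 1)).toNat + 1 := by omega
          exact ⟨h1, h2, h3, by omega, by omega,
            by rw [hidx, List.getD_cons_succ]; exact h6⟩))]
    · rw [if_neg (by simpa using hv)]
      obtain ⟨cs, cg⟩ := pvFillCell_spec n sz hsz scale hscale ox oy ri c0 hri hc0
        (if v == 1 then pvCORAL else pvEYE) p hp y x hy hx
      obtain ⟨ihs, ihg⟩ := ih (c0 + 1) (by omega) _ cs
      refine ⟨ihs, ?_⟩
      rw [ihg, cg]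
      simp only [List.length_cons, Nat.cast_add, Nat.cast_one]
      generalize hTx : PySem.Int.floordiv ((x : Int) - ox) scale = Tx
      generalize hTy : PySem.Int.floordiv ((y : Int) - oy) scale = Ty
      by_cases hC : Ty = ri ∧ 0 ≤ (y : Int) - oy ∧ 0 ≤ (x : Int) - ox ∧ c0 ≤ Tx ∧
          Tx < c0 + ((rest.length : Int) + 1) ∧ (v :: rest).getD (Tx - c0).toNat 0 ≠ 0
      · obtain ⟨h1, h2, h3, h4, h5, h6⟩ := hC
        by_cases hgt : c0 + 1 ≤ Tx
        · have hidx : (Tx - c0).toNat = (Tx - (c0 + 1)).toNat + 1 := by omega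
          rw [hidx, List.getD_cons_succ] at h6
          rw [if_pos (⟨h1, h2, h3, hgt, by omega, h6⟩ :
              Ty = ri ∧ 0 ≤ (y : Int) - oy ∧ 0 ≤ (x : Int) - ox ∧ c0 + 1 ≤ Tx ∧
              Tx < c0 + 1 + (rest.length : Int) ∧ rest.getD (Tx - (c0 + 1)).toNat 0 ≠ 0),
            if_pos (⟨h1, h2, h3, h4, h5, by rw [hidx, List.getD_cons_succ]; exact h6⟩ :
              Ty = ri ∧ 0 ≤ (y : Int) - oy ∧ 0 ≤ (x : Int) - ox ∧ c0 ≤ Tx ∧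
              Tx < c0 + ((rest.length : Int) + 1) ∧ (v :: rest).getD (Tx - c0).toNat 0 ≠ 0),
            hidx, List.getD_cons_succ]
        · have h0 : (Tx - c0).toNat = 0 := by omega
          rw [if_neg (show ¬(Ty = ri ∧ 0 ≤ (y : Int) - oy ∧ 0 ≤ (x : Int) - ox ∧
              c0 + 1 ≤ Tx ∧ Tx < c0 + 1 + (rest.length : Int) ∧
              rest.getD (Tx - (c0 + 1)).toNat 0 ≠ 0) from fun hh => hgt hh.2.2.2.1),
            if_pos (⟨h1, by omega, h2, h3⟩ :
              Ty = ri ∧ Tx = c0 ∧ 0 ≤ (y : Int) - oy ∧ 0 ≤ (x : Int) - ox),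
            if_pos (⟨h1, h2, h3, h4, h5, h6⟩ :
              Ty = ri ∧ 0 ≤ (y : Int) - oy ∧ 0 ≤ (x : Int) - ox ∧ c0 ≤ Tx ∧
              Tx < c0 + ((rest.length : Int) + 1) ∧ (v :: rest).getD (Tx - c0).toNat 0 ≠ 0),
            h0, List.getD_cons_zero]
      · rw [if_neg hC,
          if_neg (show ¬(Ty = ri ∧ 0 ≤ (y : Int) - oy ∧ 0 ≤ (x : Int) - ox ∧
            c0 + 1 ≤ Tx ∧ Tx < c0 + 1 + (rest.length : Int) ∧
            rest.getD (Tx - (c0 + 1)).toNat 0 ≠ 0) from fun hh => hC (by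
          obtain ⟨h1, h2, h3, h4, h5, h6⟩ := hh
          have hidx : (Tx - c0).toNat = (Tx - (c0 + 1)).toNat + 1 := by omega
          exact ⟨h1, h2, h3, by omega, by omega,
            by rw [hidx, List.getD_cons_succ]; exact h6⟩)),
          if_neg (show ¬(Ty = ri ∧ Tx = c0 ∧ 0 ≤ (y : Int) - oy ∧ 0 ≤ (x : Int) - ox) from
            fun hh => hC ⟨hh.1, hh.2.2.1, hh.2.2.2, by omega, by omega,
              by rw [hh.2.1, sub_self, Int.toNat_zero, List.getD_cons_zero]; exact hv⟩)]

theorem pvFillGrid_spec (n : Nat) (sz : Int) (hsz : (n : Int) = sz) (scale : Int)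
    (hscale : 0 < scale) (ox oy : Int) (grid : List (List Int)) (r0 : Int) (hr0 : 0 ≤ r0)
    (p : List (List (List Int))) (hp : pvShape n p)
    (y x : Nat) (hy : y < n) (hx : x < n) :
    pvShape n (pvFillGrid sz scale ox oy grid r0 p) ∧
    pvGet2 (pvFillGrid sz scale ox oy grid r0 p) y x =
      if 0 ≤ (y : Int) - oy ∧ 0 ≤ (x : Int) - ox ∧
         r0 ≤ PySem.Int.floordiv ((y : Int) - oy) scale ∧
         PySem.Int.floordiv ((y : Int) - oy) scale < r0 + (grid.length : Int) ∧
         0 ≤ PySem.Int.floordiv ((x : Int) - ox) scale ∧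
         PySem.Int.floordiv ((x : Int) - ox) scale <
           ((grid.getD (PySem.Int.floordiv ((y : Int) - oy) scale - r0).toNat []).length : Int) ∧
         (grid.getD (PySem.Int.floordiv ((y : Int) - oy) scale - r0).toNat []).getD
           (PySem.Int.floordiv ((x : Int) - ox) scale).toNat 0 ≠ 0 then
        (if (grid.getD (PySem.Int.floordiv ((y : Int) - oy) scale - r0).toNat []).getD
              (PySem.Int.floordiv ((x : Int) - ox) scale).toNat 0 == 1 then pvCORAL
         else pvEYE)
      else pvGet2 p y x := by
  induction grid generalizing r0 p with
  | nil =>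
    refine ⟨hp, ?_⟩
    rw [if_neg (by
      rintro ⟨-, -, h3, h4, -, -, -⟩
      simp only [List.length_nil, Nat.cast_zero, add_zero] at h4
      linarith)]
    rfl
  | cons row grest ih =>
    rw [show pvFillGrid sz scale ox oy (row :: grest) r0 p =
        pvFillGrid sz scale ox oy grest (r0 + 1) (pvFillRow sz scale ox oy r0 row 0 p) from by
      simp only [pvFillGrid, PySem.List.enumerate_cons, List.foldl_cons]]
    obtain ⟨rs, rg⟩ := pvFillRow_spec n sz hsz scale hscale ox oy r0 hr0 row 0 le_rfl p hp y x hy hx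
    obtain ⟨ihs, ihg⟩ := ih (r0 + 1) (by omega) _ rs
    refine ⟨ihs, ?_⟩
    rw [ihg, rg]
    simp only [List.length_cons, Nat.cast_add, Nat.cast_one, sub_zero, zero_add]
    generalize hTx : PySem.Int.floordiv ((x : Int) - ox) scale = Tx
    generalize hTy : PySem.Int.floordiv ((y : Int) - oy) scale = Ty
    by_cases hC : 0 ≤ (y : Int) - oy ∧ 0 ≤ (x : Int) - ox ∧ r0 ≤ Ty ∧
        Ty < r0 + ((grest.length : Int) + 1) ∧ 0 ≤ Tx ∧
        Tx < (((row :: grest).getD (Ty - r0).toNat []).length : Int) ∧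
        ((row :: grest).getD (Ty - r0).toNat []).getD Tx.toNat 0 ≠ 0
    · obtain ⟨h1, h2, h3, h4, h5, h6, h7⟩ := hC
      by_cases hgt : r0 + 1 ≤ Ty
      · have hidx : (Ty - r0).toNat = (Ty - (r0 + 1)).toNat + 1 := by omega
        rw [hidx, List.getD_cons_succ] at h6 h7
        rw [if_pos (⟨h1, h2, hgt, by omega, h5, h6, h7⟩ :
            0 ≤ (y : Int) - oy ∧ 0 ≤ (x : Int) - ox ∧ r0 + 1 ≤ Ty ∧
            Ty < r0 + 1 + (grest.length : Int) ∧ 0 ≤ Tx ∧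
            Tx < ((grest.getD (Ty - (r0 + 1)).toNat []).length : Int) ∧
            (grest.getD (Ty - (r0 + 1)).toNat []).getD Tx.toNat 0 ≠ 0),
          if_pos (⟨h1, h2, h3, h4, h5,
              by rw [hidx, List.getD_cons_succ]; exact h6,
              by rw [hidx, List.getD_cons_succ]; exact h7⟩ :
            0 ≤ (y : Int) - oy ∧ 0 ≤ (x : Int) - ox ∧ r0 ≤ Ty ∧
            Ty < r0 + ((grest.length : Int) + 1) ∧ 0 ≤ Tx ∧
            Tx < (((row :: grest).getD (Ty - r0).toNat []).length : Int) ∧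
            ((row :: grest).getD (Ty - r0).toNat []).getD Tx.toNat 0 ≠ 0),
          hidx, List.getD_cons_succ]
      · have h0 : (Ty - r0).toNat = 0 := by omega
        rw [h0, List.getD_cons_zero] at h6 h7
        rw [if_neg (show ¬(0 ≤ (y : Int) - oy ∧ 0 ≤ (x : Int) - ox ∧ r0 + 1 ≤ Ty ∧
              Ty < r0 + 1 + (grest.length : Int) ∧ 0 ≤ Tx ∧
              Tx < ((grest.getD (Ty - (r0 + 1)).toNat []).length : Int) ∧
              (grest.getD (Ty - (r0 + 1)).toNat []).getD Tx.toNat 0 ≠ 0) from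
            fun hh => hgt hh.2.2.1),
          if_pos (⟨by omega, h1, h2, h5, h6, h7⟩ :
            Ty = r0 ∧ 0 ≤ (y : Int) - oy ∧ 0 ≤ (x : Int) - ox ∧ 0 ≤ Tx ∧
            Tx < (row.length : Int) ∧ row.getD Tx.toNat 0 ≠ 0),
          if_pos (⟨h1, h2, h3, h4, h5,
              by rw [h0, List.getD_cons_zero]; exact h6,
              by rw [h0, List.getD_cons_zero]; exact h7⟩ :
            0 ≤ (y : Int) - oy ∧ 0 ≤ (x : Int) - ox ∧ r0 ≤ Ty ∧
            Ty < r0 + ((grest.length : Int) + 1) ∧ 0 ≤ Tx ∧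
            Tx < (((row :: grest).getD (Ty - r0).toNat []).length : Int) ∧
            ((row :: grest).getD (Ty - r0).toNat []).getD Tx.toNat 0 ≠ 0),
          h0, List.getD_cons_zero]
    · rw [if_neg hC,
        if_neg (show ¬(0 ≤ (y : Int) - oy ∧ 0 ≤ (x : Int) - ox ∧ r0 + 1 ≤ Ty ∧
            Ty < r0 + 1 + (grest.length : Int) ∧ 0 ≤ Tx ∧
            Tx < ((grest.getD (Ty - (r0 + 1)).toNat []).length : Int) ∧
            (grest.getD (Ty - (r0 + 1)).toNat []).getD Tx.toNat 0 ≠ 0) from fun hh => hC (by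
          obtain ⟨h1, h2, h3, h4, h5, h6, h7⟩ := hh
          have hidx : (Ty - r0).toNat = (Ty - (r0 + 1)).toNat + 1 := by omega
          exact ⟨h1, h2, by omega, by omega, h5,
            by rw [hidx, List.getD_cons_succ]; exact h6,
            by rw [hidx, List.getD_cons_succ]; exact h7⟩)),
        if_neg (show ¬(Ty = r0 ∧ 0 ≤ (y : Int) - oy ∧ 0 ≤ (x : Int) - ox ∧ 0 ≤ Tx ∧
            Tx < (row.length : Int) ∧ row.getD Tx.toNat 0 ≠ 0) from fun hh => hC (by
          obtain ⟨h1, h2, h3, h4, h5, h6⟩ := hh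
          have h0 : (Ty - r0).toNat = 0 := by omega
          exact ⟨h2, h3, by omega, by omega, h4,
            by rw [h0, List.getD_cons_zero]; exact h5,
            by rw [h0, List.getD_cons_zero]; exact h6⟩))]

-- size ≤ 0: every write is guarded by px < size, so all four loops are the identity
theorem pvFillLine_nonpos (sz : Int) (hsz : sz ≤ 0) (c : List Int) (py ox ci scale : Int)
    (L : List Int) (p : List (List (List Int))) : pvFillLine sz c py ox ci scale L p = p := by
  induction L generalizing p with
  | nil => rfl
  | cons a L ih =>
    rw [show pvFillLine sz c py ox ci scale (a :: L) p =
        pvFillLine sz c py ox ci scale L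
          (if 0 ≤ ox + ci * scale + a ∧ ox + ci * scale + a < sz ∧ 0 ≤ py ∧ py < sz then
            pvSetPix p py (ox + ci * scale + a) c
          else p) from rfl,
      if_neg (by rintro ⟨hg1, hg2, -, -⟩; linarith)]
    exact ih p

theorem pvFillCell_nonpos (sz : Int) (hsz : sz ≤ 0) (scale ox oy : Int) (c : List Int)
    (ri ci : Int) (p : List (List (List Int))) : pvFillCell sz scale ox oy c ri ci p = p := by
  have aux : ∀ (L : List Int) (p : List (List (List Int))),
      L.foldl (fun q dy =>
        pvFillLine sz c (oy + ri * scale + dy) ox ci scale (PySem.List.pyRange 0 scale 1) q) p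
        = p := by
    intro L
    induction L with
    | nil => intro p; rfl
    | cons a L ih =>
      intro p
      rw [List.foldl_cons, pvFillLine_nonpos sz hsz]
      exact ih p
  exact aux _ p

theorem pvFillRow_nonpos (sz : Int) (hsz : sz ≤ 0) (scale ox oy ri : Int) (row : List Int)
    (c0 : Int) (p : List (List (List Int))) : pvFillRow sz scale ox oy ri row c0 p = p := by
  induction row generalizing c0 p with
  | nil => rfl
  | cons v rest ih =>
    rw [show pvFillRow sz scale ox oy ri (v :: rest) c0 p =
        pvFillRow sz scale ox oy ri rest (c0 + 1)
          (if v == 0 then p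
           else pvFillCell sz scale ox oy (if v == 1 then pvCORAL else pvEYE) ri c0 p) from by
      simp only [pvFillRow, PySem.List.enumerate_cons, List.foldl_cons]]
    rw [show (if v == 0 then p
        else pvFillCell sz scale ox oy (if v == 1 then pvCORAL else pvEYE) ri c0 p) = p from by
      split
      · rfl
      · exact pvFillCell_nonpos sz hsz scale ox oy _ ri c0 p]
    exact ih (c0 + 1) p

theorem pvFillGrid_nonpos (sz scale ox oy : Int) (hsz : sz ≤ 0) (grid : List (List Int))
    (r0 : Int) (p : List (List (List Int))) : pvFillGrid sz scale ox oy grid r0 p = p := by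
  induction grid generalizing r0 p with
  | nil => rfl
  | cons row grest ih =>
    rw [show pvFillGrid sz scale ox oy (row :: grest) r0 p =
        pvFillGrid sz scale ox oy grest (r0 + 1) (pvFillRow sz scale ox oy r0 row 0 p) from by
      simp only [pvFillGrid, PySem.List.enumerate_cons, List.foldl_cons]]
    rw [pvFillRow_nonpos sz hsz]
    exact ih (r0 + 1) p

theorem render_clawd_rgba_eq_fillGrid (size : Int) :
    render_clawd_rgba size =
      pvFillGrid size (pvScaleOf size) (pvOxOf size) (pvOyOf size) pvCLAWD 0
        (List.replicate size.toNat (List.replicate size.toNat pvTRANS)) := by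
  rfl

theorem pvFloordiv_nonneg (a b : Int) (ha : 0 ≤ a) (hb : 0 < b) :
    0 ≤ PySem.Int.floordiv a b := by
  rw [PySem.Int.floordiv_eq_ediv_of_pos hb]
  exact Int.ediv_nonneg ha (le_of_lt hb)

theorem pvMain (size : Int) (hpos : 0 < size) (scale ox oy : Int) (hscale : 0 < scale) :
    pvFillGrid size scale ox oy pvCLAWD 0
        (List.replicate size.toNat (List.replicate size.toNat pvTRANS)) =
      pvGather size scale ox oy := by
  have hn : ((size.toNat : Nat) : Int) = size := Int.toNat_of_nonneg hpos.le
  have hshape0 : pvShape size.toNat (List.replicate size.toNat (List.replicate size.toNat pvTRANS)) := by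
    refine ⟨by simp, ?_⟩
    intro r hr
    rw [List.eq_of_mem_replicate hr]
    simp
  obtain ⟨hsh, -⟩ := pvFillGrid_spec size.toNat size hn scale hscale ox oy pvCLAWD 0 le_rfl _
    hshape0 0 0 (by omega) (by omega)
  apply List.ext_getElem
  · rw [hsh.1]
    unfold pvGather
    rw [List.length_map, PySem.List.length_pyRange_one]
    omega
  · intro i h1 h2
    unfold pvGather at h2 ⊢
    rw [List.getElem_map, PySem.List.getElem_pyRange_one, zero_add]
    have hi : i < size.toNat := by rw [hsh.1] at h1; exact h1
    apply List.ext_getElem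
    · rw [hsh.2 _ (List.getElem_mem h1), List.length_map, PySem.List.length_pyRange_one]
      omega
    · intro j h3 h4
      rw [List.getElem_map, PySem.List.getElem_pyRange_one, zero_add]
      have hj : j < size.toNat := by rw [hsh.2 _ (List.getElem_mem h1)] at h3; exact h3
      obtain ⟨-, hval⟩ := pvFillGrid_spec size.toNat size hn scale hscale ox oy pvCLAWD 0 le_rfl _
        hshape0 i j hi hj
      have hLHS : ((pvFillGrid size scale ox oy pvCLAWD 0
          (List.replicate size.toNat (List.replicate size.toNat pvTRANS)))[i]'h1)[j]'h3 =
          pvGet2 (pvFillGrid size scale ox oy pvCLAWD 0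
            (List.replicate size.toNat (List.replicate size.toNat pvTRANS))) i j := by
        unfold pvGet2
        rw [List.getD_eq_getElem _ _ (show i < _ from by rw [hsh.1]; exact hi)]
        rw [List.getD_eq_getElem _ _ (show j < _ from by
          rw [hsh.2 _ (List.getElem_mem _)]; exact hj)]
      rw [hLHS, hval]
      have hinit : pvGet2 (List.replicate size.toNat (List.replicate size.toNat pvTRANS)) i j
          = pvTRANS := by
        unfold pvGet2
        rw [List.getD_replicate _ hi, List.getD_replicate _ hj]
      rw [hinit]
      simp only [sub_zero, zero_add]
      have hL : ((pvCLAWD.length : Nat) : Int) = 10 := by decide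
      have hW : (((PySem.List.pyGetD pvCLAWD 0 []).length : Nat) : Int) = 11 := by decide
      have hall : ∀ r ∈ pvCLAWD, r.length = 11 := by decide
      have hvals : ∀ r ∈ pvCLAWD, ∀ v ∈ r, v = 0 ∨ v = 1 ∨ v = 2 := by decide
      rw [hL, hW]
      generalize hTy : PySem.Int.floordiv ((i : Int) - oy) scale = Ty
      generalize hTx : PySem.Int.floordiv ((j : Int) - ox) scale = Tx
      by_cases hg : 0 ≤ (i : Int) - oy ∧ 0 ≤ (j : Int) - ox
      · obtain ⟨g1, g2⟩ := hg
        have hTy0 : 0 ≤ Ty := hTy ▸ pvFloordiv_nonneg _ _ g1 hscale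
        have hTx0 : 0 ≤ Tx := hTx ▸ pvFloordiv_nonneg _ _ g2 hscale
        rw [pvPyGetD_toNat pvCLAWD Ty [] hTy0, pvPyGetD_toNat _ Tx (0 : Int) hTx0]
        by_cases hYlt : Ty < 10
        · have hmemrow : pvCLAWD.getD Ty.toNat [] ∈ pvCLAWD := by
            rw [List.getD_eq_getElem _ _ (show Ty.toNat < pvCLAWD.length from by
              have : pvCLAWD.length = 10 := by decide
              omega)]
            exact List.getElem_mem _
          have hrl : (((pvCLAWD.getD Ty.toNat []).length : Nat) : Int) = 11 := by
            rw [hall _ hmemrow]; decide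
          rw [hrl]
          by_cases hXlt : Tx < 11
          · have hmemcell : (pvCLAWD.getD Ty.toNat []).getD Tx.toNat 0 ∈
                pvCLAWD.getD Ty.toNat [] := by
              rw [List.getD_eq_getElem _ _ (show Tx.toNat < (pvCLAWD.getD Ty.toNat []).length from by
                rw [hall _ hmemrow]; omega)]
              exact List.getElem_mem _
            rcases hvals _ hmemrow _ hmemcell with h | h | h <;> rw [h] <;>
              simp [hTy0, hTx0, hYlt, hXlt]
          · rw [if_neg (fun hh => hXlt hh.2.2.2.2.2.1),
              if_neg (fun hh => hXlt hh.2.2.2)]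
        · rw [if_neg (fun hh => hYlt hh.2.2.2.1), if_neg (fun hh => hYlt hh.2.2.1)]
      · rw [if_neg (fun hh => hg ⟨hh.1, hh.2.1⟩), if_neg (fun hh => hg ⟨hh.1, hh.2.1⟩)]

-- ---- B side: the staged build also equals the gather description ----

theorem pvCropPad_eq_map {α : Type} (items : List α) (off n : Int) (filler : α) :
    pvCropPad items off n filler =
      (PySem.List.pyRange 0 n 1).map (fun i =>
        if 0 ≤ i - off ∧ i - off < (items.length : Int)
        then PySem.List.pyGetD items (i - off) filler else filler) := by
  unfold pvCropPad
  rw [PySem.List.foldl_append_singleton_eq_map]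
  rfl

theorem pvFlatRep_length {α β : Type} (f : α → β) (s : Nat) (xs : List α) :
    (xs.flatMap (fun x => List.replicate s (f x))).length = xs.length * s := by
  induction xs with
  | nil => simp
  | cons x xs ih => simp only [List.flatMap_cons, List.length_append, List.length_replicate,
      List.length_cons, ih, Nat.succ_mul]; omega

theorem pvFlatRep_getElem? {α β : Type} (f : α → β) (s : Nat) (xs : List α) (j : Nat)
    (hj : j < xs.length * s) (h2 : j / s < xs.length) :
    (xs.flatMap (fun x => List.replicate s (f x)))[j]? = some (f (xs[j / s]'h2)) := by
  induction xs generalizing j with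
  | nil => simp at hj
  | cons x xs ih =>
    rw [List.flatMap_cons]
    by_cases hlt : j < s
    · rw [List.getElem?_append_left (by simpa using hlt)]
      have hd : j / s = 0 := Nat.div_eq_of_lt hlt
      simp [hlt, hd]
    · have hs : 0 < s := by
        rcases Nat.eq_zero_or_pos s with h | h
        · rw [h, Nat.mul_zero] at hj; omega
        · exact h
      have hj' : j - s < xs.length * s := by
        simp only [List.length_cons, Nat.succ_mul] at hj; omega
      have hdiv : j / s = (j - s) / s + 1 := by
        conv_lhs => rw [show j = (j - s) + s by omega]
        rw [Nat.add_div_right _ hs]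
      have h2' : (j - s) / s < xs.length := by
        rw [hdiv] at h2; simpa using h2
      rw [List.getElem?_append_right (by simpa using not_lt.mp hlt)]
      simp only [List.length_replicate]
      rw [ih (j - s) hj' h2']
      congr 1
      have : (x :: xs)[j / s]'h2 = xs[(j - s) / s]'h2' := by
        simp only [hdiv, List.getElem_cons_succ]
      rw [this]

-- B's foldl-of-appends builds are flatMaps
theorem pvProw_eq (scale : Int) (row : List Int) :
    row.foldl (fun prow cell =>
      prow ++ List.replicate scale.toNat (PySem.Dict.getD pvPalette cell [])) [] =
    row.flatMap (fun cell => List.replicate scale.toNat (PySem.Dict.getD pvPalette cell [])) := by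
  rw [PySem.List.foldl_append_eq_flatMap]
  rfl

theorem pvImg_eq (scale ox size : Int) :
    pvCLAWD.foldl (fun img row =>
      img ++ List.replicate scale.toNat (pvCropPad
        (row.foldl (fun prow cell =>
          prow ++ List.replicate scale.toNat (PySem.Dict.getD pvPalette cell [])) [])
        ox size pvTRANS)) [] =
    pvCLAWD.flatMap (fun row => List.replicate scale.toNat (pvCropPad
      (row.flatMap (fun cell => List.replicate scale.toNat (PySem.Dict.getD pvPalette cell [])))
      ox size pvTRANS)) := by
  rw [show (fun img row =>
      img ++ List.replicate scale.toNat (pvCropPad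
        (row.foldl (fun prow cell =>
          prow ++ List.replicate scale.toNat (PySem.Dict.getD pvPalette cell [])) [])
        ox size pvTRANS)) = (fun img (row : List Int) =>
      img ++ List.replicate scale.toNat (pvCropPad
        (row.flatMap (fun cell => List.replicate scale.toNat (PySem.Dict.getD pvPalette cell [])))
        ox size pvTRANS)) from by
    funext img row
    rw [pvProw_eq]]
  rw [PySem.List.foldl_append_eq_flatMap]
  rfl

-- floordiv of nonnegative numerator by positive scale, as Nat division
theorem pvFloordiv_toNat (a b : Int) (ha : 0 ≤ a) (hb : 0 < b) :
    PySem.Int.floordiv a b = ((a.toNat / b.toNat : Nat) : Int) := by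
  rw [show a = ((a.toNat : Nat) : Int) by omega, show b = ((b.toNat : Nat) : Int) by omega,
    PySem.Int.floordiv_natCast]
  simp

theorem pvScale_pos (size : Int) : 0 < pvScaleOf size := by
  unfold pvScaleOf
  by_cases h : PySem.Int.floordiv size (max ((pvCLAWD.length : Int))
      (((PySem.List.pyGetD pvCLAWD 0 []).length : Int))) < 1
  · simp only [if_pos h]; exact one_pos
  · simp only [if_neg h]; linarith

theorem pvStaged_eq_gather (size scale ox oy : Int) (hpos : 0 < size) (hscale : 0 < scale) :
    pvCropPad
      (pvCLAWD.flatMap (fun row => List.replicate scale.toNat (pvCropPad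
        (row.flatMap (fun cell => List.replicate scale.toNat (PySem.Dict.getD pvPalette cell [])))
        ox size pvTRANS)))
      oy size (List.replicate size.toNat pvTRANS)
    = pvGather size scale ox oy := by
  have hsN0 : 0 < scale.toNat := by omega
  have hscast : ((scale.toNat : Nat) : Int) = scale := by omega
  have h10 : pvCLAWD.length = 10 := by decide
  have hall : ∀ r ∈ pvCLAWD, r.length = 11 := by decide
  have hvals : ∀ r ∈ pvCLAWD, ∀ v ∈ r, v = 0 ∨ v = 1 ∨ v = 2 := by decide
  have hLen : (pvCLAWD.flatMap (fun row => List.replicate scale.toNat (pvCropPad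
      (row.flatMap (fun cell => List.replicate scale.toNat (PySem.Dict.getD pvPalette cell [])))
      ox size pvTRANS))).length = 10 * scale.toNat := by
    rw [pvFlatRep_length, h10]
  rw [pvCropPad_eq_map]
  unfold pvGather
  apply List.map_congr_left
  intro py hpy
  rw [PySem.List.mem_pyRange_one] at hpy
  simp only [hLen]
  by_cases hv : 0 ≤ py - oy ∧ py - oy < ((10 * scale.toNat : Nat) : Int)
  · -- vertically inside the sprite band
    obtain ⟨hv0, hv1⟩ := hv
    have hsy : (py - oy).toNat < 10 * scale.toNat := by omega
    have hr : (py - oy).toNat / scale.toNat < pvCLAWD.length := by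
      rw [h10, Nat.div_lt_iff_lt_mul hsN0]; omega
    rw [if_pos ⟨hv0, hv1⟩, pvPyGetD_toNat _ _ _ hv0,
      List.getD_eq_getElem?_getD,
      pvFlatRep_getElem? _ scale.toNat pvCLAWD _ (by rw [h10]; exact hsy) hr,
      Option.getD_some]
    set r : Nat := (py - oy).toNat / scale.toNat with hrdef
    have hmemrow : pvCLAWD[r]'hr ∈ pvCLAWD := List.getElem_mem hr
    have hrow11 : (pvCLAWD[r]'hr).length = 11 := hall _ hmemrow
    have hTy : PySem.Int.floordiv (py - oy) scale = ((r : Nat) : Int) := by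
      rw [pvFloordiv_toNat _ _ hv0 hscale]
    have hTy0 : (0 : Int) ≤ ((r : Nat) : Int) := Int.natCast_nonneg r
    have hTy10 : ((r : Nat) : Int) < ((pvCLAWD.length : Nat) : Int) := by exact_mod_cast hr
    have hprowLen : ((pvCLAWD[r]'hr).flatMap
        (fun cell => List.replicate scale.toNat (PySem.Dict.getD pvPalette cell []))).length
        = 11 * scale.toNat := by
      rw [pvFlatRep_length, hrow11]
    rw [pvCropPad_eq_map]
    apply List.map_congr_left
    intro px hpx
    rw [PySem.List.mem_pyRange_one] at hpx
    simp only [← hrdef]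
    simp only [hprowLen]
    by_cases hh : 0 ≤ px - ox ∧ px - ox < ((11 * scale.toNat : Nat) : Int)
    · obtain ⟨hh0, hh1⟩ := hh
      have hsx : (px - ox).toNat < 11 * scale.toNat := by omega
      have hc : (px - ox).toNat / scale.toNat < (pvCLAWD[r]'hr).length := by
        rw [hrow11, Nat.div_lt_iff_lt_mul hsN0]; omega
      set c : Nat := (px - ox).toNat / scale.toNat with hcdef
      have hTx : PySem.Int.floordiv (px - ox) scale = ((c : Nat) : Int) := by
        rw [pvFloordiv_toNat _ _ hh0 hscale]
      have hTx11 : ((c : Nat) : Int) < (((PySem.List.pyGetD pvCLAWD 0 []).length : Nat) : Int) := by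
        have : (PySem.List.pyGetD pvCLAWD 0 []).length = 11 := by decide
        rw [this]
        have : c < 11 := by rw [← hrow11]; exact hc
        exact_mod_cast this
      rw [if_pos ⟨hh0, hh1⟩, pvPyGetD_toNat _ _ _ hh0, List.getD_eq_getElem?_getD,
        pvFlatRep_getElem? _ scale.toNat (pvCLAWD[r]'hr) _ (by rw [hrow11]; exact hsx) hc,
        Option.getD_some,
        if_pos ⟨hv0, hh0, hTy ▸ hTy10, hTx ▸ hTx11⟩, hTy, hTx,
        pvPyGetD_toNat pvCLAWD _ _ (Int.natCast_nonneg r),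
        pvPyGetD_toNat _ _ _ (Int.natCast_nonneg c)]
      simp only [Int.toNat_natCast, ← hcdef]
      have hcell : (pvCLAWD.getD r []).getD c 0 = (pvCLAWD[r]'hr)[c]'hc := by
        rw [List.getD_eq_getElem _ _ hr, List.getD_eq_getElem _ _ hc]
      simp only [hcell]
      rcases hvals _ hmemrow _ (List.getElem_mem hc) with h | h | h <;> simp only [h] <;> decide
    · -- horizontally outside the sprite: both sides transparent
      rw [if_neg hh, if_neg ?_]
      rintro ⟨-, hx0, -, hx11⟩
      apply hh
      refine ⟨hx0, ?_⟩
      rw [pvFloordiv_toNat _ _ hx0 hscale] at hx11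
      have h11 : (PySem.List.pyGetD pvCLAWD 0 []).length = 11 := by decide
      rw [h11] at hx11
      have : (px - ox).toNat / scale.toNat < 11 := by exact_mod_cast hx11
      rw [Nat.div_lt_iff_lt_mul hsN0] at this
      omega
  · -- vertically outside the sprite band: a fully transparent row
    rw [if_neg hv]
    symm
    rw [List.eq_replicate_iff]
    refine ⟨by rw [List.length_map, PySem.List.length_pyRange_one]; omega, ?_⟩
    intro b hb
    rw [List.mem_map] at hb
    obtain ⟨px, -, hbe⟩ := hb
    rw [← hbe, if_neg ?_]
    rintro ⟨hy0, -, hy10, -⟩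
    apply hv
    refine ⟨hy0, ?_⟩
    rw [pvFloordiv_toNat _ _ hy0 hscale, h10] at hy10
    have : (py - oy).toNat / scale.toNat < 10 := by exact_mod_cast hy10
    rw [Nat.div_lt_iff_lt_mul hsN0] at this
    omega

theorem pvAlt_eq_gather (size : Int) (hpos : 0 < size) :
    render_clawd_rgba_alt size =
      pvGather size (pvScaleOf size) (pvOxOf size) (pvOyOf size) := by
  have hscale_eq : max 1 (PySem.Int.floordiv size (max ((pvCLAWD.length : Int))
      (((PySem.List.pyGetD pvCLAWD 0 []).length : Int)))) = pvScaleOf size := by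
    unfold pvScaleOf
    by_cases h : PySem.Int.floordiv size (max ((pvCLAWD.length : Int))
        (((PySem.List.pyGetD pvCLAWD 0 []).length : Int))) < 1
    · rw [if_pos h]; omega
    · rw [if_neg h]; omega
  simp only [render_clawd_rgba_alt]
  rw [hscale_eq, pvImg_eq,
    pvStaged_eq_gather size (pvScaleOf size) _ _ hpos (pvScale_pos size)]
  rfl

-- ===== VERDICT (by name: the statement is the Claim_ definition above) =====
theorem render_clawd_rgba_spec : Claim_equal_render_clawd_rgba := by
  intro size _
  show render_clawd_rgba size = render_clawd_rgba_alt size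
  by_cases hpos : 0 < size
  · rw [render_clawd_rgba_eq_fillGrid, pvAlt_eq_gather size hpos]
    exact pvMain size hpos _ _ _ (by
      unfold pvScaleOf
      by_cases h : PySem.Int.floordiv size (max ((pvCLAWD.length : Int))
          (((PySem.List.pyGetD pvCLAWD 0 []).length : Int))) < 1
      · simp only [if_pos h]; exact one_pos
      · simp only [if_neg h]; linarith)
  · rw [render_clawd_rgba_eq_fillGrid, pvFillGrid_nonpos _ _ _ _ (by omega),
      show size.toNat = 0 from by omega]
    simp [render_clawd_rgba_alt, pvCropPad, PySem.List.pyRange_one_eq_nil (by omega : size ≤ 0)]
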